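-- pv_equiv track=rewrite | github.com/RamananVr/Leetcodepython | two_pointers/2105_unknown_title.py | minimumRefill
-- ===== SOURCE A (Python) =====
-- def minimumRefill(plants, capacityA, capacityB):
--     """
--     Calculate the minimum number of refills Alice and Bob need to water all the plants.
--
--     :param plants: List[int] - The amount of water each plant needs.
--     :param capacityA: int - The capacity of Alice's watering can.
--     :param capacityB: int - The capacity of Bob's watering can.
--     :return: int - The minimum number of refills required.
--     """
--     n = len(plants)
--     left, right = 0, n - 1
--     alice_water, bob_water = capacityA, capacityB
--     refills = 0
--
--     while left <= right:
--         if left == right:  # If Alice and Bob meet at the same plant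
--             if alice_water >= plants[left] or bob_water >= plants[left]:
--                 break
--             else:
--                 refills += 1
--                 break
--
--         # Alice waters the left plant
--         if alice_water >= plants[left]:
--             alice_water -= plants[left]
--         else:
--             refills += 1
--             alice_water = capacityA - plants[left]
--         left += 1
--
--         # Bob waters the right plant
--         if bob_water >= plants[right]:
--             bob_water -= plants[right]
--         else:
--             refills += 1
--             bob_water = capacityB - plants[right]
--         right -= 1
--
--     return refills
-- ===== SOURCE B (Python) =====
-- def _block_sums(cap, seq):
--     """Greedily partition seq into blocks of cumulative demand, starting a fresh
--     block (one refill) whenever adding the next plant would push the running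
--     block sum above cap.  Returns the list of block sums; it starts with a
--     sentinel empty block, so every later block corresponds to one refill."""
--     sums = [0]
--     for p in seq:
--         if sums[-1] + p > cap:
--             sums.append(p)
--         else:
--             sums[-1] += p
--     return sums
--
--
-- def minimumRefill(plants, capacityA, capacityB):
--     n = len(plants)
--     half = n // 2
--     sa = _block_sums(capacityA, plants[:half])
--     sb = _block_sums(capacityB, plants[n - half:][::-1])
--     refills = len(sa) + len(sb) - 2
--     if n % 2 == 1 and capacityA - sa[-1] < plants[half] and capacityB - sb[-1] < plants[half]:
--         refills += 1
--     return refills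
-- ===== Notes on version B (the rewrite author's own statement) =====
-- stated objective: alternative
-- what changed: Replaced A's interleaved two-pointer simulation of remaining water with a refill counter by a greedy block-partition: each gardener's demand sequence is folded into a list of cumulative block sums (a new block starts whenever the running sum would exceed the capacity), refills = number of block boundaries, plus a middle-plant check on capacity minus the last block sum.
import Mathlib
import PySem

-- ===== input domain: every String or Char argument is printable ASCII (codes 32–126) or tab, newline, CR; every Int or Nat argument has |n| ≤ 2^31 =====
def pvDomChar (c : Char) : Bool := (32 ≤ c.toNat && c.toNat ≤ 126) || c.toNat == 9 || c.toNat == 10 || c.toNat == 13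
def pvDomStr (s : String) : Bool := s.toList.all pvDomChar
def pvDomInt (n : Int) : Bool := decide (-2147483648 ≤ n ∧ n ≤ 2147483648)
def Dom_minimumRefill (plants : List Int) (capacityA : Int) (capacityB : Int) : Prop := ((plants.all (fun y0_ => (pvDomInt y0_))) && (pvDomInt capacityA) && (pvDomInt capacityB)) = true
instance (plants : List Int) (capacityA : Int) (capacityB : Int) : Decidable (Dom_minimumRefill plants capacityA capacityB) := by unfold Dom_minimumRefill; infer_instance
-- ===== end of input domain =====

-- B replaces A's interleaved two-pointer water simulation by a greedy block-partition:
-- each gardener's demand sequence is partitioned into maximal blocks of cumulative demand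
-- ≤ capacity (a list of block sums), refills = number of block boundaries; objective: alternative.

-- ===== PORT A =====
-- the while-loop of A: state (left, right, alice_water, bob_water, refills)
def minimumRefillLoop (plants : List Int) (capacityA capacityB : Int)
    (left right aliceWater bobWater refills : Int) : Int :=
  if left ≤ right then
    if left = right then
      if aliceWater ≥ PySem.List.pyGetD plants left 0 ∨ bobWater ≥ PySem.List.pyGetD plants left 0 then
        refills
      else
        refills + 1
    else
      let pl := PySem.List.pyGetD plants left 0
      let aliceWater' := if aliceWater ≥ pl then aliceWater - pl else capacityA - pl
      let refills' := if aliceWater ≥ pl then refills else refills + 1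
      let pr := PySem.List.pyGetD plants right 0
      let bobWater' := if bobWater ≥ pr then bobWater - pr else capacityB - pr
      let refills'' := if bobWater ≥ pr then refills' else refills' + 1
      minimumRefillLoop plants capacityA capacityB (left + 1) (right - 1) aliceWater' bobWater' refills''
  else
    refills
termination_by (right - left + 1).toNat
decreasing_by
  omega

def minimumRefill (plants : List Int) (capacityA : Int) (capacityB : Int) : Int :=
  let n : Int := plants.length
  minimumRefillLoop plants capacityA capacityB 0 (n - 1) capacityA capacityB 0

-- ===== PORT B =====
-- one step of _block_sums' loop; sums is never empty (it starts as [0]), so sums[-1]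
-- is ported as getLast?.getD 0 and sums[-1] += p as dropLast ++ [last + p]
def pvBlockStep (cap : Int) (sums : List Int) (p : Int) : List Int :=
  let last := sums.getLast?.getD 0
  if last + p > cap then sums ++ [p] else sums.dropLast ++ [last + p]

-- _block_sums(cap, seq)
def pvBlockSums (cap : Int) (seq : List Int) : List Int :=
  seq.foldl (pvBlockStep cap) [0]

def minimumRefill_alt (plants : List Int) (capacityA : Int) (capacityB : Int) : Int :=
  let n : Int := plants.length
  let half := PySem.Int.floordiv n 2
  let sa := pvBlockSums capacityA (PySem.List.slice plants none (some half))
  let sb := pvBlockSums capacityB ((PySem.List.slice plants (some (n - half)) none).reverse)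
  let refills : Int := (sa.length : Int) + (sb.length : Int) - 2
  if PySem.Int.mod n 2 = 1
      ∧ capacityA - sa.getLast?.getD 0 < PySem.List.pyGetD plants half 0
      ∧ capacityB - sb.getLast?.getD 0 < PySem.List.pyGetD plants half 0 then
    refills + 1
  else
    refills

-- ===== PRECONDITION & SPEC =====
def Spec_minimumRefill (plants : List Int) (capacityA : Int) (capacityB : Int) (out : Int) : Prop := out = minimumRefill_alt plants capacityA capacityB
instance (plants : List Int) (capacityA : Int) (capacityB : Int) (out : Int) : Decidable (Spec_minimumRefill plants capacityA capacityB out) := by unfold Spec_minimumRefill; infer_instance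

-- ===== CLAIM (what is proved, stated in full; the proofs are below) =====
def Claim_equal_minimumRefill : Prop := ∀ (plants : List Int) (capacityA : Int) (capacityB : Int), Dom_minimumRefill plants capacityA capacityB → Spec_minimumRefill plants capacityA capacityB (minimumRefill plants capacityA capacityB)

-- ===== LEMMAS AND PROOFS =====

-- proof-layer: final water of a one-gardener water simulation
def passW (cap : Int) : List Int → Int → Int
  | [], w => w
  | p :: tl, w => passW cap tl (if w ≥ p then w - p else cap - p)

-- proof-layer: number of refills of a one-gardener water simulation
def passC (cap : Int) : List Int → Int → Int
  | [], _ => 0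
  | p :: tl, w => (if w ≥ p then 0 else 1) + passC cap tl (if w ≥ p then w - p else cap - p)

-- proof-layer: two-ended recursion capturing one round of A's loop on a list segment
def gRec (capA capB : Int) (xs : List Int) (aw bw r : Int) : Int :=
  match xs with
  | [] => r
  | p :: tl =>
    if htl : tl = [] then
      if aw ≥ p ∨ bw ≥ p then r else r + 1
    else
      let q := tl.getLast htl
      let aw' := if aw ≥ p then aw - p else capA - p
      let r1 := if aw ≥ p then r else r + 1
      let bw' := if bw ≥ q then bw - q else capB - q
      let r2 := if bw ≥ q then r1 else r1 + 1
      gRec capA capB tl.dropLast aw' bw' r2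
termination_by xs.length
decreasing_by
  cases tl with
  | nil => exact absurd rfl htl
  | cons a t => simp

-- the half-split closed description of the answer on a segment
def twoPass (capA capB : Int) (xs : List Int) (aw bw r : Int) : Int :=
  if xs.length % 2 = 1
      ∧ passW capA (xs.take (xs.length / 2)) aw < xs.getD (xs.length / 2) 0
      ∧ passW capB ((xs.drop (xs.length - xs.length / 2)).reverse) bw < xs.getD (xs.length / 2) 0 then
    r + passC capA (xs.take (xs.length / 2)) aw
      + passC capB ((xs.drop (xs.length - xs.length / 2)).reverse) bw + 1
  else
    r + passC capA (xs.take (xs.length / 2)) aw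
      + passC capB ((xs.drop (xs.length - xs.length / 2)).reverse) bw

-- the block-sums fold tracks the water simulation: block count = refills + 1,
-- cap − last block sum = remaining water
theorem foldl_blocks (cap : Int) (xs : List Int) : ∀ (ys : List Int) (s : Int),
    (((xs.foldl (pvBlockStep cap) (ys ++ [s])).length : Int)
        = (ys.length : Int) + 1 + passC cap xs (cap - s))
    ∧ ((xs.foldl (pvBlockStep cap) (ys ++ [s])).getLast?.getD 0
        = cap - passW cap xs (cap - s)) := by
  induction xs with
  | nil => intro ys s; simp [passC, passW]
  | cons p tl ih =>
    intro ys s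
    have hl : (ys ++ [s]).getLast?.getD 0 = s := by simp
    by_cases h : s + p > cap
    · have hw : ¬ (cap - s ≥ p) := by omega
      have hstep : pvBlockStep cap (ys ++ [s]) p = (ys ++ [s]) ++ [p] := by
        simp [pvBlockStep, h]
      obtain ⟨ih1, ih2⟩ := ih (ys ++ [s]) p
      constructor
      · simp only [List.foldl_cons, hstep, ih1, passC, if_neg hw]
        simp; ring
      · simp only [List.foldl_cons, hstep, ih2, passW, if_neg hw]
    · have hw : cap - s ≥ p := by omega
      have hstep : pvBlockStep cap (ys ++ [s]) p = ys ++ [s + p] := by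
        simp [pvBlockStep, h]
      obtain ⟨ih1, ih2⟩ := ih ys (s + p)
      have hwsub : cap - (s + p) = cap - s - p := by ring
      constructor
      · simp only [List.foldl_cons, hstep, ih1, passC, if_pos hw, hwsub]
        ring
      · simp only [List.foldl_cons, hstep, ih2, passW, if_pos hw, hwsub]

theorem gRec_cons_concat (capA capB : Int) (p q : Int) (ys : List Int) (aw bw r : Int) :
    gRec capA capB (p :: (ys ++ [q])) aw bw r
      = gRec capA capB ys (if aw ≥ p then aw - p else capA - p)
          (if bw ≥ q then bw - q else capB - q)
          (if bw ≥ q then (if aw ≥ p then r else r + 1) else (if aw ≥ p then r else r + 1) + 1) := by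
  rw [gRec.eq_def]
  simp

theorem twoPass_cons_concat (capA capB p q : Int) (ys : List Int) (aw bw r : Int) :
    twoPass capA capB (p :: (ys ++ [q])) aw bw r
      = twoPass capA capB ys (if aw ≥ p then aw - p else capA - p)
          (if bw ≥ q then bw - q else capB - q)
          (if bw ≥ q then (if aw ≥ p then r else r + 1) else (if aw ≥ p then r else r + 1) + 1) := by
  have hlen : (p :: (ys ++ [q])).length = ys.length + 2 := by simp
  have hh : (p :: (ys ++ [q])).length / 2 = ys.length / 2 + 1 := by rw [hlen]; omega
  have hd : (p :: (ys ++ [q])).length - (p :: (ys ++ [q])).length / 2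
      = (ys.length - ys.length / 2) + 1 := by simp only [hlen]; omega
  have htake : (p :: (ys ++ [q])).take ((p :: (ys ++ [q])).length / 2)
      = p :: ys.take (ys.length / 2) := by
    rw [hh]
    simp [List.take_append_of_le_length (by omega : ys.length / 2 ≤ ys.length)]
  have hdrop : ((p :: (ys ++ [q])).drop ((p :: (ys ++ [q])).length - (p :: (ys ++ [q])).length / 2)).reverse
      = q :: (ys.drop (ys.length - ys.length / 2)).reverse := by
    rw [hd]
    simp [List.drop_append_of_le_length (by omega : ys.length - ys.length / 2 ≤ ys.length)]
  rw [twoPass, twoPass, htake, hdrop, hh, hlen]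
  by_cases hpar : ys.length % 2 = 1
  · have hmid : (p :: (ys ++ [q])).getD (ys.length / 2 + 1) 0 = ys.getD (ys.length / 2) 0 := by
      have h2 : ys.length / 2 < ys.length := by omega
      simp [List.getD, List.getElem?_append_left h2]
    rw [hmid]
    have hpar2 : (ys.length + 2) % 2 = 1 := by omega
    by_cases hap : aw ≥ p <;> by_cases hbq : bw ≥ q <;>
      simp only [passW, passC, if_pos, hap, hbq, ite_false, hpar, hpar2] <;>
      split_ifs <;> ring
  · have hpar2 : ¬ (ys.length + 2) % 2 = 1 := by omega
    by_cases hap : aw ≥ p <;> by_cases hbq : bw ≥ q <;>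
      simp only [passW, passC, if_pos, hap, hbq, ite_false] <;>
      simp only [hpar, hpar2, false_and, if_neg, not_false_iff] <;> ring

theorem gRec_eq_twoPass (n : Nat) :
    ∀ (capA capB : Int) (xs : List Int), xs.length = n → ∀ (aw bw r : Int),
      gRec capA capB xs aw bw r = twoPass capA capB xs aw bw r := by
  induction n using Nat.strong_induction_on with
  | _ n ih =>
    intro capA capB xs hlen aw bw r
    match xs with
    | [] => rw [gRec.eq_def]; simp [twoPass, passW, passC]
    | [p] =>
      rw [gRec.eq_def]
      simp [twoPass, passW, passC]
      by_cases h1 : aw ≥ p <;> by_cases h2 : bw ≥ p <;> simp [h1, h2]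
    | p :: q0 :: tl0 =>
      obtain ⟨ys, q, hys⟩ : ∃ ys q, q0 :: tl0 = ys ++ [q] := by
        rcases List.eq_nil_or_concat (q0 :: tl0) with h | ⟨ys, q, h⟩
        · simp at h
        · exact ⟨ys, q, by simpa using h⟩
      have hlys : ys.length + 2 = n := by
        have hl2 := hlen
        simp at hl2
        have := congrArg List.length hys
        simp at this
        omega
      rw [hys, gRec_cons_concat, ih ys.length (by omega) capA capB ys rfl,
        twoPass_cons_concat]

theorem loop_eq_gRec (plants : List Int) (capA capB : Int) (fuel : Nat) :
    ∀ (left right aw bw r : Int), 0 ≤ left → right < (plants.length : Int) →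
      (right - left + 1).toNat = fuel →
      minimumRefillLoop plants capA capB left right aw bw r
        = gRec capA capB ((plants.drop left.toNat).take fuel) aw bw r := by
  induction fuel using Nat.strong_induction_on with
  | _ fuel ih =>
    intro left right aw bw r hl hr hf
    match fuel with
    | 0 =>
      have hnle : ¬ left ≤ right := by omega
      rw [minimumRefillLoop.eq_def, gRec.eq_def]
      simp [hnle]
    | 1 =>
      have heq : left = right := by omega
      subst heq
      have hlN : left.toNat < plants.length := by omega
      have hseg : (plants.drop left.toNat).take 1 = [plants[left.toNat]] := by
        rw [List.drop_eq_getElem_cons hlN, List.take_succ_cons, List.take_zero]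
      have hget : PySem.List.pyGetD plants left 0 = plants[left.toNat] :=
        PySem.List.pyGetD_eq_getElem plants 0 hl (by omega)
      rw [minimumRefillLoop.eq_def, hseg, gRec.eq_def]
      simp [hget]
    | (k+2) =>
      have hlt : left < right := by omega
      have hlN : left.toNat < plants.length := by omega
      have hrN : right.toNat < plants.length := by omega
      have hidx : left.toNat + 1 + k = right.toNat := by omega
      have hgetq : (plants.drop (left.toNat + 1))[k]? = some plants[right.toNat] := by
        rw [List.getElem?_drop]
        rw [List.getElem?_eq_getElem (by omega)]
        simp only [hidx]
      have hseg : (plants.drop left.toNat).take (k+2)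
          = plants[left.toNat] :: (((plants.drop (left.toNat + 1)).take k) ++ [plants[right.toNat]]) := by
        rw [List.drop_eq_getElem_cons hlN]
        simp only [List.take_succ_cons]
        rw [List.take_add_one, hgetq]
        simp
      have hgetl : PySem.List.pyGetD plants left 0 = plants[left.toNat] :=
        PySem.List.pyGetD_eq_getElem plants 0 hl (by omega)
      have hgetr : PySem.List.pyGetD plants right 0 = plants[right.toNat] :=
        PySem.List.pyGetD_eq_getElem plants 0 (by omega) (by omega)
      have htn : (left + 1).toNat = left.toNat + 1 := by omega
      rw [minimumRefillLoop.eq_def, hseg, gRec_cons_concat]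
      simp only [hgetl, hgetr, if_pos (le_of_lt hlt), if_neg (by omega : ¬ left = right)]
      rw [ih k (by omega) (left + 1) (right - 1) _ _ _ (by omega) (by omega) (by omega), htn]

theorem minimumRefill_eq_twoPass (plants : List Int) (capA capB : Int) :
    minimumRefill plants capA capB = twoPass capA capB plants capA capB 0 := by
  rw [minimumRefill]
  rw [loop_eq_gRec plants capA capB plants.length 0 ((plants.length : Int) - 1) capA capB 0
    (by omega) (by omega) (by omega)]
  rw [gRec_eq_twoPass plants.length capA capB _ (by simp) capA capB 0]
  simp

theorem minimumRefill_alt_eq_twoPass (plants : List Int) (capA capB : Int) :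
    minimumRefill_alt plants capA capB = twoPass capA capB plants capA capB 0 := by
  rw [minimumRefill_alt]
  have hhalf : PySem.Int.floordiv (plants.length : Int) 2 = ((plants.length / 2 : Nat) : Int) := by
    exact_mod_cast PySem.Int.floordiv_natCast plants.length 2
  have hsub : (plants.length : Int) - ((plants.length / 2 : Nat) : Int)
      = ((plants.length - plants.length / 2 : Nat) : Int) := by
    omega
  have hmod : PySem.Int.mod (plants.length : Int) 2 = ((plants.length % 2 : Nat) : Int) := by
    exact_mod_cast PySem.Int.mod_natCast plants.length 2
  obtain ⟨ha1, ha2⟩ := foldl_blocks capA (plants.take (plants.length / 2)) [] 0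
  obtain ⟨hb1, hb2⟩ :=
    foldl_blocks capB ((plants.drop (plants.length - plants.length / 2)).reverse) [] 0
  simp only [hhalf, hsub, hmod, PySem.List.slice_to_natCast, PySem.List.slice_from_natCast,
    PySem.List.pyGetD_natCast, pvBlockSums, twoPass]
  have hnil : ([0] : List Int) = [] ++ [0] := by simp
  rw [hnil]
  simp only [List.length_nil, Nat.cast_zero, sub_zero, zero_add] at ha1 ha2 hb1 hb2
  rw [ha1, ha2, hb1, hb2]
  have hiff : (((plants.length % 2 : Nat) : Int) = 1) ↔ plants.length % 2 = 1 := by omega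
  simp only [hiff, sub_sub_cancel]
  split_ifs with h
  · ring
  · ring

-- ===== VERDICT (by name: the statement is the Claim_ definition above) =====
theorem minimumRefill_spec : Claim_equal_minimumRefill := by
  intro plants capA capB _
  unfold Spec_minimumRefill
  rw [minimumRefill_eq_twoPass, minimumRefill_alt_eq_twoPass]
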